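-- pv_equiv track=rewrite | github.com/Qwerty-terr/task1 | functions.py | max_after_zero
-- ===== SOURCE A (Python) =====
-- def max_after_zero(x):
--     ind = -1
--     for i in range(len(x) - 1):
--         if x[i] == 0 and (ind == -1 or x[i + 1] > x[ind]):
--             ind = i + 1
--     if ind == -1:
--         return -1
--     return x[ind]
-- ===== SOURCE B (Python) =====
-- def max_after_zero(x):
--     # Sort the successor positions 1..len(x)-1 by their value, largest first,
--     # then return the first one whose predecessor is a zero (ties share the value).
--     for i in sorted(range(1, len(x)), key=lambda i: x[i], reverse=True):
--         if x[i - 1] == 0: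
--             return x[i]
--     return -1
-- ===== Notes on version B (the rewrite author's own statement) =====
-- stated objective: alternative
-- what changed: Replaces A's fused linear scan that tracks the best post-zero index with a sort-then-scan algorithm: sort the positions 1..len(x)-1 by value in descending order, then return the value at the first position whose predecessor is zero (correct because a maximal qualifying value is met first in descending order; ties carry the same value).
import Mathlib
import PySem

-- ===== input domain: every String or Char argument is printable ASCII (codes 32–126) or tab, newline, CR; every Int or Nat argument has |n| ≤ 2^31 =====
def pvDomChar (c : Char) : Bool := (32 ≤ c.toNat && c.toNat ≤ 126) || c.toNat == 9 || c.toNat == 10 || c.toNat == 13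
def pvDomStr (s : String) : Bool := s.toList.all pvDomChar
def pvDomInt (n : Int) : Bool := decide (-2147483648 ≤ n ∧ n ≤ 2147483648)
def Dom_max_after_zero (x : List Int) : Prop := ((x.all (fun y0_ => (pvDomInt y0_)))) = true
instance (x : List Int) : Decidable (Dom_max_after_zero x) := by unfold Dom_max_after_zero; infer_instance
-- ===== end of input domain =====

-- B replaces A's fused index-tracking scan by sort-then-scan: sort positions 1..len-1
-- by value descending, return the first whose predecessor is zero; objective: alternative.


-- ===== PORT A =====
-- for i in range(len(x)-1): if x[i]==0 and (ind==-1 or x[i+1]>x[ind]): ind = i+1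
-- all index accesses are in range, so pyGetD with default 0 is exact
def max_after_zero (x : List Int) : Int :=
  let ind :=
    (PySem.List.pyRange 0 ((x.length : Int) - 1) 1).foldl
      (fun ind i =>
        if PySem.List.pyGetD x i 0 = 0 ∧
            (ind = -1 ∨ PySem.List.pyGetD x (i + 1) 0 > PySem.List.pyGetD x ind 0)
        then i + 1 else ind)
      (-1)
  if ind = -1 then -1 else PySem.List.pyGetD x ind 0

-- ===== PORT B =====
-- for i in sorted(range(1, len(x)), key=lambda i: x[i], reverse=True): if x[i-1]==0: return x[i]
-- the early-returning for loop, as structural recursion over the sorted index list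
def pvFindB (x : List Int) : List Int → Int
  | [] => -1
  | i :: t =>
      if PySem.List.pyGetD x (i - 1) 0 = 0 then PySem.List.pyGetD x i 0
      else pvFindB x t

def max_after_zero_alt (x : List Int) : Int :=
  pvFindB x
    (PySem.List.sorted (PySem.List.pyRange 1 (x.length : Int) 1)
      (fun i => PySem.List.pyGetD x i 0) true)

-- ===== PRECONDITION & SPEC =====
def Spec_max_after_zero (x : List Int) (out : Int) : Prop := out = max_after_zero_alt x
instance (x : List Int) (out : Int) : Decidable (Spec_max_after_zero x out) := by unfold Spec_max_after_zero; infer_instance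

-- ===== CLAIM (what is proved, stated in full; the proofs are below) =====
def Claim_equal_max_after_zero : Prop := ∀ (x : List Int), Dom_max_after_zero x → Spec_max_after_zero x (max_after_zero x)

-- ===== LEMMAS AND PROOFS =====

-- A's loop step, abbreviated for the lemmas
def pvStep (x : List Int) (ind i : Int) : Int :=
  if PySem.List.pyGetD x i 0 = 0 ∧
      (ind = -1 ∨ PySem.List.pyGetD x (i + 1) 0 > PySem.List.pyGetD x ind 0)
  then i + 1 else ind

-- candidates from the first n adjacent pairs, in position order
def pvCand (x : List Int) (n : Nat) : List Int :=
  (((x.zip (x.drop 1)).take n).filter (fun p => p.1 == 0)).map (fun p => p.2)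

-- candidate values read off the index range, B's view of the same data
def pvCandIdx (x : List Int) (b : Int) : List Int :=
  ((PySem.List.pyRange 1 b 1).filter
      (fun i => PySem.List.pyGetD x (i - 1) 0 == 0)).map
    (fun i => PySem.List.pyGetD x i 0)

theorem pvZip_get (x : List Int) (n : Nat) (hn : n < (x.zip (x.drop 1)).length) :
    (x.zip (x.drop 1))[n] = (x[n]'(by simp at hn; omega), x[n+1]'(by simp at hn; omega)) := by
  simp at hn
  simp [List.getElem_zip]

theorem pvFoldl_max_append (t : List Int) (h v : Int) :
    (t ++ [v]).foldl max h = max (t.foldl max h) v := by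
  simp [List.foldl_append]

-- loop invariant: after processing indices 0..n-1, either no candidate was seen and ind = -1,
-- or ind is the index of the first maximal candidate seen so far
theorem pvInvariant (x : List Int) (n : Nat) (hn : n ≤ (x.zip (x.drop 1)).length) :
    (pvCand x n = [] ∧
       (PySem.List.pyRange 0 (n : Int) 1).foldl (pvStep x) (-1) = -1) ∨
    (∃ (k : Nat) (h : Int) (t : List Int),
       1 ≤ k ∧ k ≤ n ∧
       (PySem.List.pyRange 0 (n : Int) 1).foldl (pvStep x) (-1) = (k : Int) ∧
       pvCand x n = h :: t ∧
       PySem.List.pyGetD x (k : Int) 0 = t.foldl max h) := by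
  induction n with
  | zero =>
      left
      constructor
      · simp [pvCand]
      · rfl
  | succ n ih =>
      have hn' : n < (x.zip (x.drop 1)).length := by omega
      have hlen : n + 1 < x.length := by simp at hn'; omega
      have hrange : PySem.List.pyRange 0 ((n : Int) + 1) 1
          = PySem.List.pyRange 0 (n : Int) 1 ++ [(n : Int)] :=
        PySem.List.pyRange_one_succ_right (by positivity)
      have htake : (x.zip (x.drop 1)).take (n + 1)
          = (x.zip (x.drop 1)).take n ++ [(x.zip (x.drop 1))[n]] :=
        List.take_succ_eq_append_getElem hn'
      have hget := pvZip_get x n hn'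
      have hxn : PySem.List.pyGetD x (n : Int) 0 = x[n]'(by omega) := by
        rw [PySem.List.pyGetD_natCast]
        exact List.getD_eq_getElem _ _ _
      have hxn1 : PySem.List.pyGetD x ((n : Int) + 1) 0 = x[n + 1]'hlen := by
        have : ((n : Int) + 1) = ((n + 1 : Nat) : Int) := by push_cast; ring
        rw [this, PySem.List.pyGetD_natCast]
        exact List.getD_eq_getElem _ _ _
      have hcand : pvCand x (n + 1)
          = pvCand x n ++ (if x[n]'(by omega) = 0 then [x[n + 1]'hlen] else []) := by
        simp only [pvCand, htake, hget, List.filter_append, List.map_append]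
        by_cases h0 : x[n]'(by omega) = 0 <;> simp [h0]
      have hfold : (PySem.List.pyRange 0 ((n + 1 : Nat) : Int) 1).foldl (pvStep x) (-1)
          = pvStep x ((PySem.List.pyRange 0 (n : Int) 1).foldl (pvStep x) (-1)) (n : Int) := by
        push_cast
        rw [hrange, List.foldl_append]
        rfl
      by_cases h0 : x[n]'(by omega) = 0
      · -- x[n] = 0: a new candidate x[n+1] appears
        rcases ih (by omega) with ⟨hc, hi⟩ | ⟨k, h, t, hk1, hkn, hi, hc, hm⟩
        · -- first candidate
          right
          refine ⟨n + 1, x[n + 1]'hlen, [], by omega, by omega, ?_, ?_, ?_⟩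
          · rw [hfold, hi]
            simp [pvStep, hxn, h0]
          · rw [hcand, hc]; simp [h0]
          · simpa using hxn1
        · -- compare x[n+1] with the running max
          have hkne : ((k : Nat) : Int) ≠ -1 := by omega
          by_cases hgt : x[n + 1]'hlen > t.foldl max h
          · right
            refine ⟨n + 1, h, t ++ [x[n + 1]'hlen], by omega, by omega, ?_, ?_, ?_⟩
            · rw [hfold, hi]
              have hcond : pvStep x (k : Int) (n : Int) = (n : Int) + 1 := by
                unfold pvStep
                rw [if_pos ⟨by rw [hxn]; exact h0, Or.inr (by rw [hxn1, hm]; exact hgt)⟩]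
              rw [hcond]
              push_cast; ring
            · rw [hcand, hc]; simp [h0]
            · rw [pvFoldl_max_append]
              have hcast : ((n + 1 : Nat) : Int) = (n : Int) + 1 := by push_cast; ring
              rw [hcast, hxn1]
              omega
          · right
            refine ⟨k, h, t ++ [x[n + 1]'hlen], hk1, by omega, ?_, ?_, ?_⟩
            · rw [hfold, hi]
              simp only [pvStep, hxn, hxn1, hm, h0]
              rw [if_neg]
              rintro ⟨-, h2 | h2⟩
              · exact hkne h2
              · omega
            · rw [hcand, hc]; simp [h0]
            · rw [pvFoldl_max_append, hm]
              omega
      · -- x[n] ≠ 0: nothing changes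
        rcases ih (by omega) with ⟨hc, hi⟩ | ⟨k, h, t, hk1, hkn, hi, hc, hm⟩
        · left
          refine ⟨by rw [hcand, hc]; simp [h0], ?_⟩
          rw [hfold, hi]; simp [pvStep, hxn, h0]
        · right
          refine ⟨k, h, t, hk1, by omega, ?_, by rw [hcand, hc]; simp [h0], hm⟩
          rw [hfold, hi]; simp [pvStep, hxn, h0]

-- the loop bound (len x - 1 as Int) equals the pair count
theorem pvBound (x : List Int) :
    PySem.List.pyRange 0 ((x.length : Int) - 1) 1
      = PySem.List.pyRange 0 (((x.zip (x.drop 1)).length : Nat) : Int) 1 := by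
  cases x with
  | nil => simp [PySem.List.pyRange_one_eq_nil]
  | cons a l =>
      have hb : ((a :: l).length : Int) - 1
          = ((((a :: l).zip ((a :: l).drop 1)).length : Nat) : Int) := by
        simp
      rw [hb]

-- the index-range view of the candidates equals the pair view, prefix by prefix
theorem pvCandIdx_eq (x : List Int) (n : Nat) (hn : n ≤ (x.zip (x.drop 1)).length) :
    pvCandIdx x ((n : Int) + 1) = pvCand x n := by
  induction n with
  | zero =>
      simp [pvCandIdx, pvCand, PySem.List.pyRange_one_eq_nil]
  | succ n ih =>
      have hn' : n < (x.zip (x.drop 1)).length := by omega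
      have hlen : n + 1 < x.length := by simp at hn'; omega
      have hxn : PySem.List.pyGetD x (n : Int) 0 = x[n]'(by omega) := by
        rw [PySem.List.pyGetD_natCast]
        exact List.getD_eq_getElem _ _ _
      have hxn1 : PySem.List.pyGetD x ((n : Int) + 1) 0 = x[n + 1]'hlen := by
        have : ((n : Int) + 1) = ((n + 1 : Nat) : Int) := by push_cast; ring
        rw [this, PySem.List.pyGetD_natCast]
        exact List.getD_eq_getElem _ _ _
      have hrange : PySem.List.pyRange 1 (((n + 1 : Nat) : Int) + 1) 1
          = PySem.List.pyRange 1 ((n : Int) + 1) 1 ++ [(n : Int) + 1] := by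
        have := PySem.List.pyRange_one_succ_right (a := 1) (b := (n : Int) + 1) (by omega)
        rw [show (((n + 1 : Nat) : Int) + 1) = ((n : Int) + 1) + 1 by push_cast; ring, this]
      have htake : (x.zip (x.drop 1)).take (n + 1)
          = (x.zip (x.drop 1)).take n ++ [(x.zip (x.drop 1))[n]] :=
        List.take_succ_eq_append_getElem hn'
      have hget := pvZip_get x n hn'
      simp only [pvCandIdx, hrange, List.filter_append, List.map_append] at *
      rw [ih (by omega)]
      simp only [pvCand, htake, hget, List.filter_append, List.map_append]
      have hsub : ((n : Int) + 1) - 1 = (n : Int) := by ring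
      by_cases h0 : x[n]'(by omega) = 0
      · simp [hsub, hxn, hxn1, h0]
      · simp [hsub, hxn, h0]

-- B's loop on a key-descending index list: -1 when nothing qualifies, else the
-- first qualifying value, which bounds every qualifying value
theorem pvFindB_spec (x : List Int) (l : List Int)
    (hp : l.Pairwise (fun a b => PySem.List.pyGetD x b 0 ≤ PySem.List.pyGetD x a 0)) :
    ((l.filter (fun i => PySem.List.pyGetD x (i - 1) 0 == 0)).map
        (fun i => PySem.List.pyGetD x i 0) = [] ∧ pvFindB x l = -1) ∨
    (∃ v, pvFindB x l = v ∧
       v ∈ (l.filter (fun i => PySem.List.pyGetD x (i - 1) 0 == 0)).map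
         (fun i => PySem.List.pyGetD x i 0) ∧
       ∀ y ∈ (l.filter (fun i => PySem.List.pyGetD x (i - 1) 0 == 0)).map
         (fun i => PySem.List.pyGetD x i 0), y ≤ v) := by
  induction l with
  | nil => left; exact ⟨rfl, rfl⟩
  | cons i t ih =>
      rcases List.pairwise_cons.mp hp with ⟨hhead, htail⟩
      by_cases hq : PySem.List.pyGetD x (i - 1) 0 = 0
      · right
        refine ⟨PySem.List.pyGetD x i 0, ?_, ?_, ?_⟩
        · simp [pvFindB, hq]
        · simp [hq]
        · intro y hy
          simp only [List.filter_cons, hq, beq_self_eq_true, if_pos, List.map_cons,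
            List.mem_cons, List.mem_map, List.mem_filter] at hy
          rcases hy with rfl | ⟨j, ⟨hj, -⟩, rfl⟩
          · exact le_refl _
          · exact hhead j hj
      · have h' : (i :: t).filter (fun i => PySem.List.pyGetD x (i - 1) 0 == 0)
            = t.filter (fun i => PySem.List.pyGetD x (i - 1) 0 == 0) := by
          simp [hq]
        rw [h', show pvFindB x (i :: t) = pvFindB x t by simp [pvFindB, hq]]
        exact ih htail

-- ===== VERDICT (by name: the statement is the Claim_ definition above) =====
theorem max_after_zero_spec : Claim_equal_max_after_zero := by
  intro x _
  unfold Spec_max_after_zero max_after_zero max_after_zero_alt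
  set P := (x.zip (x.drop 1)).length with hP
  -- A's value via the loop invariant
  have hinv := pvInvariant x P le_rfl
  have htake : (x.zip (x.drop 1)).take P = x.zip (x.drop 1) := List.take_length
  rw [pvBound x]
  rw [show (fun (ind i : Int) =>
        if PySem.List.pyGetD x i 0 = 0 ∧
            (ind = -1 ∨ PySem.List.pyGetD x (i + 1) 0 > PySem.List.pyGetD x ind 0)
        then i + 1 else ind) = pvStep x from rfl]
  -- B's candidate list is a permutation of A's
  have hlen1 : (x.length : Int) = (P : Int) + 1 ∨ (x.length : Int) = 0 ∧ (P : Int) = 0 := by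
    cases x with
    | nil => right; simp [hP]
    | cons a t => left; simp [hP]
  have hrange_eq : PySem.List.pyRange 1 (x.length : Int) 1 = PySem.List.pyRange 1 ((P : Int) + 1) 1 := by
    rcases hlen1 with h | ⟨h1, h2⟩
    · rw [h]
    · rw [h1, h2]
      simp [PySem.List.pyRange_one_eq_nil]
  have hperm : (PySem.List.sorted (PySem.List.pyRange 1 (x.length : Int) 1)
      (fun i => PySem.List.pyGetD x i 0) true).Perm (PySem.List.pyRange 1 ((P : Int) + 1) 1) := by
    rw [← hrange_eq]
    exact PySem.List.sorted_perm _ _ _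
  have hpermC : ((PySem.List.sorted (PySem.List.pyRange 1 (x.length : Int) 1)
        (fun i => PySem.List.pyGetD x i 0) true).filter
        (fun i => PySem.List.pyGetD x (i - 1) 0 == 0)).map
        (fun i => PySem.List.pyGetD x i 0)
      |>.Perm (pvCand x P) := by
    rw [← pvCandIdx_eq x P le_rfl]
    exact ((hperm.filter _).map _)
  have hB := pvFindB_spec x _
    (PySem.List.sorted_pairwise_rev (PySem.List.pyRange 1 (x.length : Int) 1)
      (fun i => PySem.List.pyGetD x i 0))
  rcases hinv with ⟨hc, hi⟩ | ⟨k, h, t, hk1, hkn, hi, hc, hm⟩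
  · -- no candidates: both -1
    rw [hi, if_pos rfl]
    rcases hB with ⟨-, hb⟩ | ⟨v, hb, hv, -⟩
    · exact hb.symm
    · exfalso
      have := hpermC.mem_iff.mp hv
      rw [hc] at this
      exact List.not_mem_nil this
  · -- candidates h :: t : both are the maximum
    rw [hi, if_neg (by omega), hm]
    rcases hB with ⟨hemp, -⟩ | ⟨v, hb, hv, hub⟩
    · exfalso
      have : (pvCand x P).length = 0 := by
        rw [← hpermC.length_eq, hemp]
        rfl
      rw [hc] at this
      simp at this
    · rw [hb]
      have hvA : v ∈ pvCand x P := hpermC.mem_iff.mp hv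
      have hfold := PySem.List.le_foldl_max t h
      have hfmem : t.foldl max h ∈ pvCand x P := by
        rw [hc]
        rcases PySem.List.foldl_max_mem t h with he | he
        · rw [he]; exact List.mem_cons_self
        · exact List.mem_cons_of_mem _ he
      have h1 : v ≤ t.foldl max h := by
        rw [hc] at hvA
        rcases List.mem_cons.mp hvA with rfl | hvt
        · exact hfold.1
        · exact hfold.2 _ hvt
      have h2 : t.foldl max h ≤ v := hub _ (hpermC.mem_iff.mpr hfmem)
      omega
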